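-- pv_equiv track=rewrite | github.com/jathon0754/toy_localization_agent | workflow.py | _age_group_from_age_text
-- ===== SOURCE A (Python) =====
-- def _age_group_from_age_text(value: str) -> str:
--     if not value:
--         return ""
--     for token in value.split():
--         token = token.strip()
--         if not token:
--             continue
--         digits = "".join(ch for ch in token if ch.isdigit())
--         if not digits:
--             continue
--         age = int(digits)
--         if age <= 2:
--             return "0-2"
--         if age <= 5:
--             return "3-5"
--         if age <= 7:
--             return "6-7"
--         if age <= 9:
--             return "8-9"
--         return "10+"
--     return ""
-- ===== SOURCE B (Python) =====
-- def _age_group_from_age_text(value: str) -> str: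
--     # Single character-level scan: collect the digits of the first
--     # whitespace-delimited token that contains any digit, then classify
--     # via a threshold table instead of an if-cascade.
--     digits = ""
--     for ch in value:
--         if ch.isspace():
--             if digits:
--                 break
--         elif ch.isdigit():
--             digits += ch
--     if not digits:
--         return ""
--     age = int(digits)
--     labels = ["0-2", "3-5", "6-7", "8-9", "10+"]
--     return labels[sum(age > b for b in (2, 5, 7, 9))]
-- ===== Notes on version B (the rewrite author's own statement) =====
-- stated objective: alternative
-- what changed: Replaced A's split()/strip()/join() token passes by a single character-level scan that accumulates the digits of the first digit-containing whitespace-delimited token, and the five-way if-cascade by a threshold-table lookup labels[sum(age > b for b in (2,5,7,9))].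
import Mathlib
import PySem

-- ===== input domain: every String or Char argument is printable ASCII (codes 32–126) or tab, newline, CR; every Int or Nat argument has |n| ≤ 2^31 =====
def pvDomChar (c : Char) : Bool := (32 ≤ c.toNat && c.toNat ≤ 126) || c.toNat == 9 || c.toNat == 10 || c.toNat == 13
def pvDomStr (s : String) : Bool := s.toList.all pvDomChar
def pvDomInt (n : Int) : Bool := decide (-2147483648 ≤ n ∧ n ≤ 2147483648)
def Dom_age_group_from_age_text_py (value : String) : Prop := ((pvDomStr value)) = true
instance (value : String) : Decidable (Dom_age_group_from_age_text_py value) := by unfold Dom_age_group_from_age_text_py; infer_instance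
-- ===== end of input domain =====

-- B replaces A's split()/strip()/join() per-token passes by a single character scan
-- collecting the digits of the first digit-containing token, and the if-cascade by a
-- threshold-table lookup (objective: alternative single-pass structure).

-- ===== PORT A =====
-- loop 'for token in value.split(): …' of A, one equation per iteration
def agA_loop : List (List Char) → String
  | [] => ""                                   -- loop fell through: return ""
  | t :: rest =>
    let token := PySem.Chars.strip t
    if token = [] then agA_loop rest           -- if not token: continue
    else
      let digits := token.filter PySem.Chars.isdigit   -- "".join(ch for ch in token if ch.isdigit())
      if digits = [] then agA_loop rest        -- if not digits: continue
      else
        match PySem.Int.ofChars? digits with   -- age = int(digits)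
        | some age =>
          if age ≤ 2 then "0-2"
          else if age ≤ 5 then "3-5"
          else if age ≤ 7 then "6-7"
          else if age ≤ 9 then "8-9"
          else "10+"
        | none => ""  -- unreachable: digits is a nonempty run of '0'-'9', int() succeeds

def age_group_from_age_text_py (value : String) : String :=
  if value.toList = [] then ""                 -- if not value: return ""
  else agA_loop (PySem.Chars.split₀ value.toList)

-- ===== PORT B =====
-- B's 'for ch in value' loop: accumulate digits, break at whitespace once digits ≠ ""
def agB_scan : List Char → List Char → List Char
  | [], digits => digits
  | c :: rest, digits =>
    if PySem.Chars.isspace c then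
      if digits ≠ [] then digits               -- break
      else agB_scan rest digits
    else if PySem.Chars.isdigit c then agB_scan rest (digits ++ [c])
    else agB_scan rest digits

def age_group_from_age_text_py_alt (value : String) : String :=
  let digits := agB_scan value.toList []
  if digits = [] then ""
  else
    match PySem.Int.ofChars? digits with       -- age = int(digits)
    | some age =>
      let labels := ["0-2", "3-5", "6-7", "8-9", "10+"]
      labels.getD ((([2, 5, 7, 9] : List Int).map (fun b => if b < age then 1 else 0)).sum) ""
    | none => ""  -- unreachable: digits is a nonempty run of '0'-'9', int() succeeds

-- ===== PRECONDITION & SPEC =====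
def Spec_age_group_from_age_text_py (value : String) (out : String) : Prop := out = age_group_from_age_text_py_alt value
instance (value : String) (out : String) : Decidable (Spec_age_group_from_age_text_py value out) := by unfold Spec_age_group_from_age_text_py; infer_instance

-- ===== CLAIM (what is proved, stated in full; the proofs are below) =====
def Claim_equal_age_group_from_age_text_py : Prop := ∀ (value : String), Dom_age_group_from_age_text_py value → Spec_age_group_from_age_text_py value (age_group_from_age_text_py value)

-- ===== LEMMAS AND PROOFS =====

-- finishing step of B once the scan has produced its digit list
def agB_fin (digits : List Char) : String :=
  if digits = [] then ""
  else
    match PySem.Int.ofChars? digits with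
    | some age =>
      ["0-2", "3-5", "6-7", "8-9", "10+"].getD
        ((([2, 5, 7, 9] : List Int).map (fun b => if b < age then 1 else 0)).sum) ""
    | none => ""

lemma agB_alt_eq (value : String) :
    age_group_from_age_text_py_alt value = agB_fin (agB_scan value.toList []) := by
  simp [age_group_from_age_text_py_alt, agB_fin]

-- A's if-cascade equals B's threshold-table lookup, for every age
lemma classify_eq (age : Int) :
    (if age ≤ 2 then "0-2" else if age ≤ 5 then "3-5" else if age ≤ 7 then "6-7"
      else if age ≤ 9 then "8-9" else "10+")
    = ["0-2", "3-5", "6-7", "8-9", "10+"].getD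
        ((([2, 5, 7, 9] : List Int).map (fun b => if b < age then 1 else 0)).sum) "" := by
  simp only [List.map_cons, List.map_nil, List.sum_cons, List.sum_nil]
  split_ifs <;> first | rfl | omega

-- split₀.go with an accumulator prepends the accumulated tokens
lemma go_acc (cs : List Char) : ∀ cur acc,
    PySem.Chars.split₀.go cs cur acc = acc.reverse ++ PySem.Chars.split₀.go cs cur [] := by
  induction cs with
  | nil => intro cur acc; by_cases h : cur.isEmpty <;> simp [PySem.Chars.split₀.go, h]
  | cons c rest ih =>
    intro cur acc
    by_cases hs : PySem.Chars.isspace c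
    · by_cases h : cur.isEmpty
      · simp only [PySem.Chars.split₀.go, hs, h, if_true]
        exact ih [] acc
      · simp only [PySem.Chars.split₀.go, hs, h, if_true, if_false, Bool.false_eq_true]
        rw [ih [] (cur.reverse :: acc), ih [] [cur.reverse]]
        simp
    · simp only [PySem.Chars.split₀.go, hs]
      exact ih (c :: cur) acc

-- strip is the identity on a whitespace-free list
lemma dropWhile_no_ws (l : List Char) (h : ∀ c ∈ l, PySem.Chars.isspace c = false) :
    List.dropWhile PySem.Chars.isspace l = l := by
  cases l with
  | nil => rfl
  | cons a t => rw [List.dropWhile_cons_of_neg (by simp [h a (by simp)])]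

lemma strip_no_ws (l : List Char) (h : ∀ c ∈ l, PySem.Chars.isspace c = false) :
    PySem.Chars.strip l = l := by
  rw [PySem.Chars.strip, PySem.Chars.lstrip, PySem.Chars.rstrip,
    dropWhile_no_ws l h, dropWhile_no_ws l.reverse (by simpa using h), List.reverse_reverse]

-- one iteration of A's token loop on a nonempty whitespace-free token, in terms of agB_fin
lemma agA_step (tok : List Char) (rest : List (List Char)) (hne : ¬ tok = [])
    (hws : ∀ c ∈ tok, PySem.Chars.isspace c = false) :
    agA_loop (tok :: rest)
      = if tok.filter PySem.Chars.isdigit = [] then agA_loop rest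
        else agB_fin (tok.filter PySem.Chars.isdigit) := by
  simp only [agA_loop]
  rw [strip_no_ws tok hws, if_neg hne]
  by_cases hd : tok.filter PySem.Chars.isdigit = []
  · rw [if_pos hd, if_pos hd]
  · rw [if_neg hd, if_neg hd, agB_fin, if_neg hd]
    cases PySem.Int.ofChars? (tok.filter PySem.Chars.isdigit) with
    | none => rfl
    | some age => exact classify_eq age

-- main invariant: A's remaining token loop agrees with B's scan, where cur is the
-- reversed partial token (whitespace-free) and B has collected its digits so far
lemma main_inv (cs : List Char) : ∀ cur, (∀ c ∈ cur, PySem.Chars.isspace c = false) →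
    agA_loop (PySem.Chars.split₀.go cs cur []) = agB_fin (agB_scan cs (cur.reverse.filter PySem.Chars.isdigit)) := by
  induction cs with
  | nil =>
    intro cur h
    by_cases hc : cur.isEmpty
    · simp only [PySem.Chars.split₀.go, hc, if_true]
      rw [List.isEmpty_iff.mp hc]
      rfl
    · simp only [PySem.Chars.split₀.go, hc, Bool.false_eq_true, if_false, agB_scan, List.reverse_singleton]
      have hne : ¬ cur.reverse = [] := by
        simp [List.isEmpty_iff] at hc; simp [hc]
      rw [agA_step cur.reverse [] hne (by simpa using h)]
      by_cases hd : cur.reverse.filter PySem.Chars.isdigit = []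
      · rw [if_pos hd, hd]; rfl
      · rw [if_neg hd]
  | cons c rest ih =>
    intro cur h
    by_cases hs : PySem.Chars.isspace c
    · simp only [PySem.Chars.split₀.go, hs, if_true, agB_scan]
      by_cases hc : cur.isEmpty
      · rw [if_pos hc, List.isEmpty_iff.mp hc]
        simpa using ih [] (by simp)
      · rw [if_neg hc, go_acc rest [] [cur.reverse]]
        have hne : ¬ cur.reverse = [] := by
          simp [List.isEmpty_iff] at hc; simp [hc]
        simp only [List.reverse_cons, List.reverse_nil, List.nil_append, List.singleton_append]
        rw [agA_step cur.reverse (PySem.Chars.split₀.go rest [] []) hne (by simpa using h)]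
        by_cases hd : cur.reverse.filter PySem.Chars.isdigit = []
        · rw [if_pos hd, hd, if_neg (by simp)]
          simpa using ih [] (by simp)
        · rw [if_neg hd, if_pos hd]
    · have h' : ∀ x ∈ c :: cur, PySem.Chars.isspace x = false := by
        intro x hx
        rcases List.mem_cons.mp hx with rfl | hx
        · exact Bool.not_eq_true _ ▸ Bool.eq_false_iff.mpr hs
        · exact h x hx
      simp only [PySem.Chars.split₀.go, hs, Bool.false_eq_true, if_false, agB_scan]
      by_cases hdig : PySem.Chars.isdigit c
      · rw [if_pos hdig]
        have := ih (c :: cur) h'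
        simpa [List.filter_append, hdig] using this
      · rw [if_neg hdig]
        have := ih (c :: cur) h'
        simpa [List.filter_append, hdig] using this

-- ===== VERDICT (by name: the statement is the Claim_ definition above) =====
theorem age_group_from_age_text_py_spec : Claim_equal_age_group_from_age_text_py := by
  intro value _
  show _ = _
  rw [agB_alt_eq]
  by_cases h : value.toList = []
  · simp [age_group_from_age_text_py, h, agB_scan, agB_fin]
  · rw [age_group_from_age_text_py, if_neg h, PySem.Chars.split₀]
    simpa using main_inv value.toList [] (by simp)
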